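-- pv_equiv track=rewrite | github.com/filipporiva2001/Mathematical-Computing-MT2200- | Final_code.py | drs
-- ===== SOURCE A (Python) =====
-- def noc(coeffs):
--     """
--     Number of sign changes in the coefficient list (zeros ignored).
--     """
--     j = 0
--     c = 0
--     coeffs = coeffs[:]  # copy list so we don't modify the original
--
--     # Remove zeros
--     while j < len(coeffs):
--         if coeffs[j] == 0:
--             del coeffs[j]
--         else:
--             j += 1
--
--     # Count sign changes
--     for i in range(1, len(coeffs)):
--         if coeffs[i] * coeffs[i - 1] < 0:
--             c += 1
--
--     return c
--
-- def drs(coeffs):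
--     """
--     Descartes' Rule of Signs:
--     - Possible # of positive real roots from sign changes in f(x)
--     - Possible # of negative real roots from sign changes in f(-x)
--     """
--     # Positive roots possibilities
--     c = noc(coeffs)
--     pr = []
--     for i in range(0, c + 1, 2):
--         result = c - i
--         if result >= 0:
--             pr.append(result)
--
--     # Build coefficients for f(-x): flip signs of odd-power terms
--     negf = []
--     for i in range(len(coeffs)):
--         if i % 2 == 0:
--             negf.append(coeffs[i])
--         else:
--             negf.append(-coeffs[i])
--
--     # Negative roots possibilities
--     cneg = noc(negf)
--     nr = []
--     for i in range(0, cneg + 1, 2):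
--         result = cneg - i
--         if result >= 0:
--             nr.append(result)
--
--     return pr, nr
-- ===== SOURCE B (Python) =====
-- def drs(coeffs):
--     # One streaming pass: carry the (positive-sign, negated-poly-sign) of the last
--     # nonzero coefficient and bump both change counters in the same step; no
--     # intermediate lists, then emit the possibility lists in closed form.
--     prev = None
--     cpos = cneg = 0
--     for i, c in enumerate(coeffs):
--         if c == 0:
--             continue
--         s = 1 if c > 0 else -1
--         t = s if i % 2 == 0 else -s
--         if prev is not None:
--             if prev[0] != s:
--                 cpos += 1
--             if prev[1] != t:
--                 cneg += 1
--         prev = (s, t)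
--     return list(range(cpos, -1, -2)), list(range(cneg, -1, -2))
-- ===== Notes on version B (the rewrite author's own statement) =====
-- stated objective: alternative
-- what changed: B replaces A's five staged passes (quadratic del-based zero removal, index/product sign scan, negf list building, second removal+scan, two step-2 accumulation loops) by one streaming fold that skips zeros in-stream, carries only the last nonzero coefficient's (sign, parity-flipped sign) pair, increments both change counters in the same step, and emits the result lists in closed form with range(c,-1,-2); no intermediate lists are built.
import Mathlib
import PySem

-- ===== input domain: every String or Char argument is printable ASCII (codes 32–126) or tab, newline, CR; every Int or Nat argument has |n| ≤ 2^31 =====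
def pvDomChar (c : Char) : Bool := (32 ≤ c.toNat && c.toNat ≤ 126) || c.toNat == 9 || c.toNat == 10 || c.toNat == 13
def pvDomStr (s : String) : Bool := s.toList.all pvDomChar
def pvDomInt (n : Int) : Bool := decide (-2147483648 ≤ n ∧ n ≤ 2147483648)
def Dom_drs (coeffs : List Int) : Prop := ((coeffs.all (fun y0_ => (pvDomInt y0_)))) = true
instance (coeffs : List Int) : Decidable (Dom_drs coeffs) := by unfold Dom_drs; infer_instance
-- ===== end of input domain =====

-- B replaces A's staged list passes by one streaming fold that skips zeros, carries the last
-- nonzero coefficient's (sign, parity-flipped sign) pair, counts both kinds of sign change in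
-- the same step, and emits the result lists in closed form (alternative decomposition).

-- ===== PORT A =====
-- the while-loop with `del coeffs[j]` / `j += 1` (terminates: len - j decreases)
def nocRemove (cs : List Int) (j : Nat) : List Int :=
  if h : j < cs.length then
    if cs[j] = 0 then nocRemove (cs.eraseIdx j) j else nocRemove cs (j + 1)
  else cs
termination_by cs.length - j
decreasing_by
  · simp [List.length_eraseIdx_of_lt h]; omega
  · omega

def noc (coeffs : List Int) : Int :=
  let cs := nocRemove coeffs 0
  (PySem.List.pyRange 1 (cs.length : Int) 1).foldl
    (fun c i =>
      if PySem.List.pyGetD cs i 0 * PySem.List.pyGetD cs (i - 1) 0 < 0 then c + 1 else c) 0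

def drs (coeffs : List Int) : List Int × List Int :=
  let c := noc coeffs
  let pr := (PySem.List.pyRange 0 (c + 1) 2).foldl
    (fun pr i => if c - i ≥ 0 then pr ++ [c - i] else pr) []
  let negf := (PySem.List.pyRange 0 (coeffs.length : Int) 1).foldl
    (fun negf i =>
      if PySem.Int.mod i 2 = 0 then negf ++ [PySem.List.pyGetD coeffs i 0]
      else negf ++ [-(PySem.List.pyGetD coeffs i 0)]) []
  let cneg := noc negf
  let nr := (PySem.List.pyRange 0 (cneg + 1) 2).foldl
    (fun nr i => if cneg - i ≥ 0 then nr ++ [cneg - i] else nr) []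
  (pr, nr)

-- ===== PORT B =====
-- loop body of B's single pass: state = (last nonzero's (s, t) pair if any, cpos, cneg)
def stepB (st : Option (Int × Int) × Int × Int) (p : Int × Int) : Option (Int × Int) × Int × Int :=
  if p.2 = 0 then st
  else
    let s : Int := if p.2 > 0 then 1 else -1
    let t : Int := if PySem.Int.mod p.1 2 = 0 then s else -s
    match st with
    | (none, cpos, cneg) => (some (s, t), cpos, cneg)
    | (some prev, cpos, cneg) =>
        (some (s, t),
         if prev.1 ≠ s then cpos + 1 else cpos,
         if prev.2 ≠ t then cneg + 1 else cneg)

def drs_alt (coeffs : List Int) : List Int × List Int :=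
  let st := (PySem.List.enumerate coeffs).foldl stepB (none, 0, 0)
  (PySem.List.pyRange st.2.1 (-1) (-2), PySem.List.pyRange st.2.2 (-1) (-2))

-- ===== PRECONDITION & SPEC =====
def Spec_drs (coeffs : List Int) (out : List Int × List Int) : Prop := out = drs_alt coeffs
instance (coeffs : List Int) (out : List Int × List Int) : Decidable (Spec_drs coeffs out) := by unfold Spec_drs; infer_instance

-- ===== CLAIM (what is proved, stated in full; the proofs are below) =====
def Claim_equal_drs : Prop := ∀ (coeffs : List Int), Dom_drs coeffs → Spec_drs coeffs (drs coeffs)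

-- ===== LEMMAS AND PROOFS =====

def sgnB (x : Int) : Int := if x > 0 then 1 else -1

-- the (s, t) pair B's loop stores for a table entry
def sig (p : Int × Int) : Int × Int :=
  (sgnB p.2, if PySem.Int.mod p.1 2 = 0 then sgnB p.2 else -sgnB p.2)

-- count of adjacent pairs satisfying P
def adjC {α : Type} (P : α → α → Bool) : List α → Nat
  | a :: b :: t => (if P a b then 1 else 0) + adjC P (b :: t)
  | _ => 0

theorem nocRemove_eq (cs : List Int) (j : Nat) :
    nocRemove cs j = cs.take j ++ (cs.drop j).filter (fun x => x != 0) := by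
  fun_induction nocRemove cs j with
  | case1 cs j h hz ih =>
    rw [ih]
    have hdj : cs.drop j = cs[j] :: cs.drop (j + 1) := List.drop_eq_getElem_cons h
    rw [List.eraseIdx_eq_take_drop_succ]
    rw [List.take_left' (by simp [List.length_take]; omega),
        List.drop_left' (by simp [List.length_take]; omega), hdj]
    simp [hz]
  | case2 cs j h hz ih =>
    rw [ih]
    have hdj : cs.drop j = cs[j] :: cs.drop (j + 1) := List.drop_eq_getElem_cons h
    have ht : cs.take (j + 1) = cs.take j ++ [cs[j]] := by
      rw [List.take_add_one, List.getElem?_eq_getElem h]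
      rfl
    rw [hdj, ht, List.filter_cons, if_pos (by simpa using hz : (cs[j] != 0) = true),
        List.append_assoc, List.singleton_append]
  | case3 cs j h =>
    rw [List.take_of_length_le (by omega), List.drop_of_length_le (by omega)]
    simp

theorem countP_range_adj {α : Type} (P : α → α → Bool) (d : α) :
    ∀ (l : List α),
      (List.range (l.length - 1)).countP (fun k => P (l.getD k d) (l.getD (k + 1) d))
        = adjC P l
  | [] => by simp [adjC]
  | [a] => by simp [adjC]
  | a :: b :: t => by
    have ih := countP_range_adj P d (b :: t)
    have hlen : (a :: b :: t).length - 1 = t.length + 1 := by simp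
    rw [hlen, List.range_succ_eq_map, List.countP_cons, List.countP_map]
    simp only [List.getD_cons_zero, List.getD_cons_succ, Function.comp_def]
    simp only [List.length_cons, Nat.add_sub_cancel, List.getD_cons_succ] at ih
    rw [ih]
    simp [adjC]
    omega

theorem adjC_map {α β : Type} (f : α → β) (R : β → β → Bool) :
    ∀ (l : List α), adjC R (l.map f) = adjC (fun a b => R (f a) (f b)) l
  | [] => by simp [adjC]
  | [a] => by simp [adjC]
  | a :: b :: t => by
    have ih := adjC_map f R (b :: t)
    simp only [List.map_cons] at ih ⊢
    simp [adjC] at ih ⊢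
    omega

theorem adjC_congr {α : Type} (P Q : α → α → Bool) :
    ∀ (l : List α), (∀ a ∈ l, ∀ b ∈ l, P a b = Q a b) → adjC P l = adjC Q l
  | [], _ => rfl
  | [a], _ => rfl
  | a :: b :: t, h => by
    have ih := adjC_congr P Q (b :: t) (fun x hx y hy =>
      h x (List.mem_cons_of_mem a hx) y (List.mem_cons_of_mem a hy))
    have hab : P a b = Q a b := h a (by simp) b (by simp)
    simp [adjC, hab, ih]

theorem mul_neg_decide_eq_sgn (x y : Int) (hx : x ≠ 0) (hy : y ≠ 0) :
    decide (x * y < 0) = (sgnB x != sgnB y) := by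
  rcases lt_or_gt_of_ne hx with h1 | h1 <;> rcases lt_or_gt_of_ne hy with h2 | h2
  · have hp : 0 < x * y := mul_pos_of_neg_of_neg h1 h2
    simp [sgnB, show ¬ x * y < 0 by omega, show ¬ 0 < x by omega, show ¬ 0 < y by omega]
  · have hp : x * y < 0 := mul_neg_of_neg_of_pos h1 h2
    simp [sgnB, hp, show ¬ 0 < x by omega, h2]
  · have hp : x * y < 0 := mul_neg_of_pos_of_neg h1 h2
    simp [sgnB, hp, h1, show ¬ 0 < y by omega]
  · have hp : 0 < x * y := mul_pos h1 h2
    simp [sgnB, show ¬ x * y < 0 by omega, h1, h2]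

theorem sgnB_neg (x : Int) (hx : x ≠ 0) : sgnB (-x) = -sgnB x := by
  unfold sgnB
  rcases lt_or_gt_of_ne hx with h1 | h1
  · rw [if_pos (by omega : (0 : Int) < -x), if_neg (by omega : ¬ (0 : Int) < x)]
    norm_num
  · rw [if_neg (by omega : ¬ (0 : Int) < -x), if_pos h1]

-- my own Prop-if counting fold (A's `if … : Prop` shape)
theorem foldl_count_ite {α : Type} (p : α → Prop) [DecidablePred p] :
    ∀ (l : List α) (a : Int),
      l.foldl (fun acc x => if p x then acc + 1 else acc) a
        = a + (l.countP (fun x => decide (p x)) : Int)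
  | [], a => by simp
  | x :: l, a => by
    rw [List.foldl_cons, foldl_count_ite p l, List.countP_cons]
    by_cases h : p x <;> simp [h] <;> ring

theorem enum_filter_map_snd :
    ∀ (l : List Int) (s : Int),
      (((PySem.List.enumerate l s).filter (fun p => p.2 != 0)).map (fun p => p.2))
        = l.filter (fun x => x != 0)
  | [], s => by simp [PySem.List.enumerate_nil]
  | x :: l, s => by
    rw [PySem.List.enumerate_cons, List.filter_cons, List.filter_cons]
    by_cases h : x = 0 <;> simp [h, enum_filter_map_snd l (s + 1)]

-- A's sign-change counting loop, structurally
theorem noc_count (cs : List Int) :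
    (PySem.List.pyRange 1 (cs.length : Int) 1).foldl
      (fun c i =>
        if PySem.List.pyGetD cs i 0 * PySem.List.pyGetD cs (i - 1) 0 < 0 then c + 1 else c) 0
      = (adjC (fun a b => decide (b * a < 0)) cs : Int) := by
  rw [PySem.List.pyRange_one, List.foldl_map]
  have hcg : ∀ (c : Int), ∀ k ∈ List.range ((cs.length : Int) - 1).toNat,
      (if PySem.List.pyGetD cs (1 + (k : Int)) 0 * PySem.List.pyGetD cs (1 + (k : Int) - 1) 0 < 0
        then c + 1 else c)
      = (if cs.getD (k + 1) 0 * cs.getD k 0 < 0 then c + 1 else c) := by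
    intro c k _
    have h1 : (1 + (k : Int)) = ((k + 1 : Nat) : Int) := by push_cast; ring
    have h2 : (1 + (k : Int) - 1) = ((k : Nat) : Int) := by ring
    rw [h2, h1, PySem.List.pyGetD_natCast, PySem.List.pyGetD_natCast]
  rw [PySem.List.foldl_congr_mem _ _ _ _ hcg,
      foldl_count_ite (fun k => cs.getD (k + 1) 0 * cs.getD k 0 < 0)]
  have hn : ((cs.length : Int) - 1).toNat = cs.length - 1 := by omega
  rw [hn, countP_range_adj (fun a b => decide (b * a < 0)) 0 cs]
  simp

-- A's step-2 accumulation loop is the countdown range, in closed form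
theorem pr_loop (n : Nat) :
    (PySem.List.pyRange 0 ((n : Int) + 1) 2).foldl
      (fun pr i => if (n : Int) - i ≥ 0 then pr ++ [(n : Int) - i] else pr) []
      = PySem.List.pyRange (n : Int) (-1) (-2) := by
  rw [PySem.List.pyRange_of_pos 0 ((n : Int) + 1) (by norm_num)]
  rw [if_pos (by positivity : (0 : Int) < (n : Int) + 1), List.foldl_map]
  have hc1 : (((n : Int) + 1 - 0 + 2 - 1) / 2).toNat = (((n : Int) + 2) / 2).toNat := by omega
  rw [hc1]
  have hcg : ∀ (acc : List Int), ∀ k ∈ List.range (((n : Int) + 2) / 2).toNat,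
      (if (n : Int) - (0 + 2 * (k : Int)) ≥ 0 then acc ++ [(n : Int) - (0 + 2 * (k : Int))] else acc)
      = acc ++ [(n : Int) - (0 + 2 * (k : Int))] := by
    intro acc k hk
    rw [List.mem_range] at hk
    have : (k : Int) < ((n : Int) + 2) / 2 := by omega
    rw [if_pos (by omega)]
  rw [PySem.List.foldl_congr_mem _ _ _ _ hcg, PySem.List.foldl_append_singleton_eq_map,
      List.nil_append]
  show _ = PySem.List.pyRange (n : Int) (-1) (-2)
  simp only [PySem.List.pyRange]
  norm_num
  rw [if_pos (by omega : (-1 : Int) < (n : Int))]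
  have hc2 : (((n : Int) + 1 + 2 - 1) / 2).toNat = (((n : Int) + 2) / 2).toNat := by omega
  rw [hc2]
  apply List.map_congr_left
  intro k _
  ring

def Ftab (coeffs : List Int) : List (Int × Int) :=
  (PySem.List.enumerate coeffs).filter (fun p => p.2 != 0)

def Ppos : Int × Int → Int × Int → Bool := fun p q => sgnB p.2 != sgnB q.2

def Pneg : Int × Int → Int × Int → Bool := fun p q =>
  (if PySem.Int.mod p.1 2 = 0 then sgnB p.2 else -sgnB p.2)
    != (if PySem.Int.mod q.1 2 = 0 then sgnB q.2 else -sgnB q.2)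

theorem bne_swap (x y : Int) : (x != y) = (y != x) := by
  by_cases h : x = y
  · subst h; rfl
  · have hx : (x != y) = true := by simpa using h
    have hy : (y != x) = true := by simpa using Ne.symm h
    rw [hx, hy]

theorem noc_eq_adj (coeffs : List Int) :
    noc coeffs
      = (adjC (fun a b => decide (b * a < 0)) (coeffs.filter (fun x => x != 0)) : Int) := by
  unfold noc
  rw [nocRemove_eq coeffs 0]
  simp only [List.take_zero, List.drop_zero, List.nil_append]
  exact noc_count _

theorem mem_Ftab_snd_ne {coeffs : List Int} {p : Int × Int} (hp : p ∈ Ftab coeffs) :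
    p.2 ≠ 0 := by
  have := List.of_mem_filter hp
  simpa using this

theorem countA_pos (coeffs : List Int) :
    adjC (fun a b => decide (b * a < 0)) (coeffs.filter (fun x => x != 0))
      = adjC Ppos (Ftab coeffs) := by
  rw [← enum_filter_map_snd coeffs 0, adjC_map]
  apply adjC_congr
  intro a ha b hb
  rw [mul_neg_decide_eq_sgn _ _ (mem_Ftab_snd_ne hb) (mem_Ftab_snd_ne ha), bne_swap]
  rfl

-- A's negf-building loop is the alternating negation of the enumerated list
theorem negf_eq (coeffs : List Int) :
    (PySem.List.pyRange 0 (coeffs.length : Int) 1).foldl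
      (fun negf i =>
        if PySem.Int.mod i 2 = 0 then negf ++ [PySem.List.pyGetD coeffs i 0]
        else negf ++ [-(PySem.List.pyGetD coeffs i 0)]) []
      = (PySem.List.enumerate coeffs).map
          (fun p => if PySem.Int.mod p.1 2 = 0 then p.2 else -p.2) := by
  have hcg : ∀ (acc : List Int), ∀ i ∈ PySem.List.pyRange 0 (coeffs.length : Int) 1,
      (if PySem.Int.mod i 2 = 0 then acc ++ [PySem.List.pyGetD coeffs i 0]
        else acc ++ [-(PySem.List.pyGetD coeffs i 0)])
      = acc ++ [if PySem.Int.mod i 2 = 0 then PySem.List.pyGetD coeffs i 0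
                else -(PySem.List.pyGetD coeffs i 0)] := by
    intro acc i _
    by_cases h : PySem.Int.mod i 2 = 0
    · rw [if_pos h, if_pos h]
    · rw [if_neg h, if_neg h]
  rw [PySem.List.foldl_congr_mem _ _ _ _ hcg, PySem.List.foldl_append_singleton_eq_map,
      List.nil_append, PySem.List.enumerate_eq_map_pyRange coeffs 0, List.map_map]
  rfl

theorem negf_filter (coeffs : List Int) :
    (((PySem.List.enumerate coeffs).map
        (fun p => if PySem.Int.mod p.1 2 = 0 then p.2 else -p.2)).filter (fun x => x != 0))
      = (Ftab coeffs).map (fun p => if PySem.Int.mod p.1 2 = 0 then p.2 else -p.2) := by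
  rw [List.filter_map]
  unfold Ftab
  congr 1
  apply List.filter_congr
  intro p _
  show ((if PySem.Int.mod p.1 2 = 0 then p.2 else -p.2) != 0) = (p.2 != 0)
  by_cases h : PySem.Int.mod p.1 2 = 0
  · rw [if_pos h]
  · rw [if_neg h]
    simp [bne, neg_eq_zero]

theorem countA_neg (coeffs : List Int) :
    adjC (fun a b => decide (b * a < 0))
        (((PySem.List.enumerate coeffs).map
          (fun p => if PySem.Int.mod p.1 2 = 0 then p.2 else -p.2)).filter (fun x => x != 0))
      = adjC Pneg (Ftab coeffs) := by
  rw [negf_filter, adjC_map]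
  apply adjC_congr
  intro a ha b hb
  have ha2 := mem_Ftab_snd_ne ha
  have hb2 := mem_Ftab_snd_ne hb
  have hna : (if PySem.Int.mod a.1 2 = 0 then a.2 else -a.2) ≠ 0 := by
    by_cases h : PySem.Int.mod a.1 2 = 0
    · rw [if_pos h]; exact ha2
    · rw [if_neg h]; simpa using ha2
  have hnb : (if PySem.Int.mod b.1 2 = 0 then b.2 else -b.2) ≠ 0 := by
    by_cases h : PySem.Int.mod b.1 2 = 0
    · rw [if_pos h]; exact hb2
    · rw [if_neg h]; simpa using hb2
  rw [mul_neg_decide_eq_sgn _ _ hnb hna, bne_swap]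
  have hsa : sgnB (if PySem.Int.mod a.1 2 = 0 then a.2 else -a.2)
      = (if PySem.Int.mod a.1 2 = 0 then sgnB a.2 else -sgnB a.2) := by
    by_cases h : PySem.Int.mod a.1 2 = 0
    · rw [if_pos h, if_pos h]
    · rw [if_neg h, if_neg h, sgnB_neg a.2 ha2]
  have hsb : sgnB (if PySem.Int.mod b.1 2 = 0 then b.2 else -b.2)
      = (if PySem.Int.mod b.1 2 = 0 then sgnB b.2 else -sgnB b.2) := by
    by_cases h : PySem.Int.mod b.1 2 = 0
    · rw [if_pos h, if_pos h]
    · rw [if_neg h, if_neg h, sgnB_neg b.2 hb2]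
  rw [hsa, hsb]
  rfl

-- ===== B-side: analysis of the streaming fold =====

-- zeros are skipped by the fold
theorem foldB_filter :
    ∀ (l : List (Int × Int)) (st : Option (Int × Int) × Int × Int),
      l.foldl stepB st = (l.filter (fun p => p.2 != 0)).foldl stepB st
  | [], st => rfl
  | p :: l, st => by
    rw [List.foldl_cons, List.filter_cons]
    by_cases h : p.2 = 0
    · have hz : stepB st p = st := by simp [stepB, h]
      simp [h, hz, foldB_filter l st]
    · have hb : (p.2 != 0) = true := by simpa using h
      rw [hb]
      exact foldB_filter l (stepB st p)

-- a step on a nonzero entry, in terms of sig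
theorem stepB_none {p : Int × Int} (hp : p.2 ≠ 0) (a b : Int) :
    stepB (none, a, b) p = (some (sig p), a, b) := by
  simp only [stepB, if_neg hp, sig, sgnB]

theorem stepB_some {p : Int × Int} (hp : p.2 ≠ 0) (q : Int × Int) (a b : Int) :
    stepB (some q, a, b) p
      = (some (sig p),
         if q.1 ≠ (sig p).1 then a + 1 else a,
         if q.2 ≠ (sig p).2 then b + 1 else b) := by
  simp only [stepB, if_neg hp, sig, sgnB]

theorem sig_fst (q p : Int × Int) :
    ((sig q).1 ≠ (sig p).1) ↔ Ppos q p = true := by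
  simp [sig, Ppos]

theorem sig_snd (q p : Int × Int) :
    ((sig q).2 ≠ (sig p).2) ↔ Pneg q p = true := by
  simp [sig, Pneg]

-- the fold started after one entry counts exactly the adjacent sign changes
theorem foldB_counts :
    ∀ (l : List (Int × Int)) (q : Int × Int) (a b : Int), (∀ p ∈ l, p.2 ≠ 0) →
      (l.foldl stepB (some (sig q), a, b)).2
        = (a + (adjC Ppos (q :: l) : Int), b + (adjC Pneg (q :: l) : Int))
  | [], q, a, b, _ => by simp [adjC]
  | p :: l, q, a, b, h => by
    have hp : p.2 ≠ 0 := h p (by simp)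
    rw [List.foldl_cons, stepB_some hp,
        foldB_counts l p _ _ (fun x hx => h x (List.mem_cons_of_mem p hx))]
    have e1 : (if (sig q).1 ≠ (sig p).1 then a + 1 else a)
        = a + (if Ppos q p then (1 : Int) else 0) := by
      by_cases hc : Ppos q p = true
      · rw [if_pos ((sig_fst q p).mpr hc), if_pos hc]
      · rw [if_neg (fun hh => hc ((sig_fst q p).mp hh)), if_neg hc, add_zero]
    have e2 : (if (sig q).2 ≠ (sig p).2 then b + 1 else b)
        = b + (if Pneg q p then (1 : Int) else 0) := by
      by_cases hc : Pneg q p = true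
      · rw [if_pos ((sig_snd q p).mpr hc), if_pos hc]
      · rw [if_neg (fun hh => hc ((sig_snd q p).mp hh)), if_neg hc, add_zero]
    rw [e1, e2]
    have hadj1 : (adjC Ppos (q :: p :: l) : Int)
        = (if Ppos q p then (1 : Int) else 0) + (adjC Ppos (p :: l) : Int) := by
      show ((adjC Ppos (q :: p :: l) : Nat) : Int) = _
      rw [show adjC Ppos (q :: p :: l)
            = (if Ppos q p then 1 else 0) + adjC Ppos (p :: l) from rfl]
      push_cast
      by_cases hc : Ppos q p = true <;> simp [hc]
    have hadj2 : (adjC Pneg (q :: p :: l) : Int)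
        = (if Pneg q p then (1 : Int) else 0) + (adjC Pneg (p :: l) : Int) := by
      show ((adjC Pneg (q :: p :: l) : Nat) : Int) = _
      rw [show adjC Pneg (q :: p :: l)
            = (if Pneg q p then 1 else 0) + adjC Pneg (p :: l) from rfl]
      push_cast
      by_cases hc : Pneg q p = true <;> simp [hc]
    rw [hadj1, hadj2]
    simp only [Prod.mk.injEq]
    exact ⟨by ring, by ring⟩

-- B's whole fold computes the two adjacent-change counts of the nonzero table
theorem foldB_top (coeffs : List Int) :
    ((PySem.List.enumerate coeffs).foldl stepB (none, 0, 0)).2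
      = ((adjC Ppos (Ftab coeffs) : Int), (adjC Pneg (Ftab coeffs) : Int)) := by
  rw [foldB_filter]
  show ((Ftab coeffs).foldl stepB (none, 0, 0)).2 = _
  rcases hF : Ftab coeffs with _ | ⟨p, rest⟩
  · simp [adjC]
  · have hmem : ∀ x ∈ Ftab coeffs, x.2 ≠ 0 := fun x hx => mem_Ftab_snd_ne hx
    rw [hF] at hmem
    have hp : p.2 ≠ 0 := hmem p (by simp)
    rw [List.foldl_cons, stepB_none hp,
        foldB_counts rest p 0 0 (fun x hx => hmem x (List.mem_cons_of_mem p hx))]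
    simp

theorem drs_eq (coeffs : List Int) : drs coeffs = drs_alt coeffs := by
  rw [drs.eq_def, drs_alt.eq_def]
  simp only []
  rw [negf_eq, noc_eq_adj coeffs, countA_pos,
      noc_eq_adj ((PySem.List.enumerate coeffs).map
        (fun p => if PySem.Int.mod p.1 2 = 0 then p.2 else -p.2)), countA_neg,
      pr_loop (adjC Ppos (Ftab coeffs)), pr_loop (adjC Pneg (Ftab coeffs)), foldB_top]

-- ===== VERDICT (by name: the statement is the Claim_ definition above) =====
theorem drs_spec : Claim_equal_drs := fun coeffs _ => drs_eq coeffs
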